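-- pv_equiv track=rewrite | github.com/MitchellRegan/AdventOfCodePython | AdventOfCode/Year2024/Day21.py | numpadBFS
-- ===== SOURCE A (Python) =====
-- from collections import deque
--
-- numpadPos = {'7':(0,0), '8':(0,1), '9':(0,2), '4':(1,0), '5':(1,1), '6':(1,2), '1':(2,0), '2':(2,1), '3':(2,2), '0':(3,1), 'A':(3,2)}
--
-- def numpadBFS(b1:str, b2:str)->list:
--     '''Finds the shortest path from button 1 (b1) to button 2 (b2) and returns the list of arrows needed to get there.'''
--     startPos = numpadPos[b1]
--     endPos = numpadPos[b2]
--     seen = {startPos:None} #Key = (r,c) position, Value = ((r,c) of previous pos, arrow for direction taken)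
--     q = deque()
--     q.append(startPos)
--     while len(q) > 0:
--         head = q.popleft()
--
--         #If the end position is found, we return the arrow keys taken to get there
--         if head == endPos:
--             steps = []
--             prev = seen[head]
--             while prev is not None:
--                 steps.insert(0, prev[1])
--                 prev = seen[prev[0]]
--             return steps
--
--         r,c = head
--         for adj in [(r+1,c,'v'), (r-1,c,'^'), (r,c+1,'>'), (r,c-1,'<')]:
--             if (adj[0], adj[1]) not in seen.keys():
--                 #Checking if the adjacent tile is within the boundaries of the keypad
--                 if adj[0] > -1 and adj[0] < 4 and adj[1] > -1 and adj[1] < 3: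
--                     #Can't go over the empty position (3,0)
--                     if not (adj[0] == 3 and adj[1] == 0):
--                         seen[(adj[0], adj[1])] = (head, adj[2])
--                         q.append((adj[0], adj[1]))
--     return []
-- ===== SOURCE B (Python) =====
-- numpadPos = {'7':(0,0), '8':(0,1), '9':(0,2), '4':(1,0), '5':(1,1), '6':(1,2), '1':(2,0), '2':(2,1), '3':(2,2), '0':(3,1), 'A':(3,2)}
--
-- def numpadBFS(b1:str, b2:str)->list:
--     '''Level-by-level frontier expansion: paths[pos] holds the arrow path of the first
--     discovery; each round expands the whole frontier at once (no queue, no parent map).'''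
--     end = numpadPos[b2]
--     paths = {numpadPos[b1]: []}
--     frontier = [numpadPos[b1]]
--     while frontier:
--         if end in paths:
--             return paths[end]
--         nxt = []
--         for r, c in frontier:
--             for nr, nc, arrow in ((r+1, c, 'v'), (r-1, c, '^'), (r, c+1, '>'), (r, c-1, '<')):
--                 if (nr, nc) not in paths and 0 <= nr < 4 and 0 <= nc < 3 and (nr, nc) != (3, 0):
--                     paths[(nr, nc)] = paths[(r, c)] + [arrow]
--                     nxt.append((nr, nc))
--         frontier = nxt
--     return []
-- ===== Notes on version B (the rewrite author's own statement) =====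
-- stated objective: simpler
-- what changed: A's queue-and-parent-map BFS with a backward path-reconstruction loop is replaced by level-by-level frontier expansion that stores the forward arrow path for each discovered key, so the answer is read off directly from the paths dict.
import Mathlib
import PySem

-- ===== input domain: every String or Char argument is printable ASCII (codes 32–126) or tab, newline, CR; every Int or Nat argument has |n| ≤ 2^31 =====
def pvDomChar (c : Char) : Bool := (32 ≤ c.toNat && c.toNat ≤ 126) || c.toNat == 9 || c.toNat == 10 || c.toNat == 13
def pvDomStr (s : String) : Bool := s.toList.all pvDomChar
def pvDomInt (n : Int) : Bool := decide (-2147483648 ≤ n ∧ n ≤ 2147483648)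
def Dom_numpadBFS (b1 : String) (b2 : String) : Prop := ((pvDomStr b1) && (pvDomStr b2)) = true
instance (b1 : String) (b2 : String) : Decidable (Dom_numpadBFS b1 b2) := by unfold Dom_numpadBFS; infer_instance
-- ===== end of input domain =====

-- B replaces A's queue-and-parent-map BFS (with backward path reconstruction) by a
-- level-by-level frontier expansion keeping a dict of forward arrow paths (objective: simpler).

-- ===== PORT A =====
def numpadPosA : PySem.Dict String (Int × Int) :=
  PySem.Dict.ofList [("7",(0,0)), ("8",(0,1)), ("9",(0,2)), ("4",(1,0)), ("5",(1,1)), ("6",(1,2)),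
   ("1",(2,0)), ("2",(2,1)), ("3",(2,2)), ("0",(3,1)), ("A",(3,2))]

-- inner while loop of A's path reconstruction: prev = seen[head]; walk parents, prepending arrows
def reconstructA (seen : PySem.Dict (Int × Int) (Option ((Int × Int) × String))) :
    Nat → Option ((Int × Int) × String) → List String → List String
  | 0, _, steps => steps
  | _ + 1, none, steps => steps
  | fuel + 1, some (p, arrow), steps =>
      reconstructA seen fuel (seen.getD p none) (arrow :: steps)

-- A's while loop: FIFO queue of positions, seen = parent map; fuel bounds iterations (≤ 11 positions ever enqueued)
def loopA (endPos : Int × Int) :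
    Nat → List (Int × Int) → PySem.Dict (Int × Int) (Option ((Int × Int) × String)) → List String
  | 0, _, _ => []
  | _ + 1, [], _ => []
  | fuel + 1, head :: q, seen =>
      if head = endPos then
        reconstructA seen 16 (seen.getD head none) []
      else
        let r := head.1; let c := head.2
        let st := [(r+1, c, "v"), (r-1, c, "^"), (r, c+1, ">"), (r, c-1, "<")].foldl
          (fun (st : PySem.Dict (Int × Int) (Option ((Int × Int) × String)) × List (Int × Int)) adj =>
            if (st.1.get? (adj.1, adj.2.1)).isNone then
              if adj.1 > -1 ∧ adj.1 < 4 ∧ adj.2.1 > -1 ∧ adj.2.1 < 3 then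
                if ¬ (adj.1 = 3 ∧ adj.2.1 = 0) then
                  (st.1.insert (adj.1, adj.2.1) (some (head, adj.2.2)), st.2 ++ [(adj.1, adj.2.1)])
                else st
              else st
            else st) (seen, q)
        loopA endPos fuel st.2 st.1

def numpadBFS (b1 : String) (b2 : String) : List String :=
  match numpadPosA.get? b1, numpadPosA.get? b2 with
  | some startPos, some endPos =>
      loopA endPos 64 [startPos] (PySem.Dict.insert PySem.Dict.empty startPos none)
  | _, _ => []  -- Python raises KeyError here; outside Pre_

-- ===== PORT B =====
def numpadPosB : PySem.Dict String (Int × Int) :=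
  PySem.Dict.ofList [("7",(0,0)), ("8",(0,1)), ("9",(0,2)), ("4",(1,0)), ("5",(1,1)), ("6",(1,2)),
   ("1",(2,0)), ("2",(2,1)), ("3",(2,2)), ("0",(3,1)), ("A",(3,2))]

-- expand ONE frontier cell: try its four neighbours, recording a forward path for each new one
def expandCellB (paths : PySem.Dict (Int × Int) (List String))
    (nxt : List (Int × Int)) (r c : Int) :
    PySem.Dict (Int × Int) (List String) × List (Int × Int) :=
  [(r+1, c, "v"), (r-1, c, "^"), (r, c+1, ">"), (r, c-1, "<")].foldl
    (fun st nb =>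
      match nb with
      | (nr, nc, arrow) =>
        if (st.1.get? (nr, nc)).isNone ∧ 0 ≤ nr ∧ nr < 4 ∧ 0 ≤ nc ∧ nc < 3 ∧ (nr, nc) ≠ (3, 0) then
          (st.1.insert (nr, nc) (st.1.getD (r, c) [] ++ [arrow]), st.2 ++ [(nr, nc)])
        else st)
    (paths, nxt)

-- one whole-frontier round: fold expandCellB over the current frontier
def expandLevelB (frontier : List (Int × Int))
    (paths : PySem.Dict (Int × Int) (List String)) :
    PySem.Dict (Int × Int) (List String) × List (Int × Int) :=
  frontier.foldl (fun st rc => expandCellB st.1 st.2 rc.1 rc.2) (paths, [])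

-- B's while loop over levels; fuel bounds the number of levels (≤ 16 on the 4×3 pad)
def levelsB (endPos : Int × Int) :
    Nat → List (Int × Int) → PySem.Dict (Int × Int) (List String) → List String
  | 0, _, _ => []
  | _ + 1, [], _ => []
  | fuel + 1, frontier, paths =>
      match paths.get? endPos with
      | some p => p
      | none =>
          let st := expandLevelB frontier paths
          levelsB endPos fuel st.2 st.1

def numpadBFS_alt (b1 : String) (b2 : String) : List String :=
  match numpadPosB.get? b2 with
  | none => []  -- Python raises KeyError here; outside Pre_
  | some endPos =>
    match numpadPosB.get? b1 with
    | none => []  -- Python raises KeyError here; outside Pre_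
    | some startPos =>
        levelsB endPos 16 [startPos] (PySem.Dict.insert PySem.Dict.empty startPos [])

-- ===== PRECONDITION & SPEC =====
-- Pre_ excludes exactly the inputs where Python A raises KeyError (a button not on the numpad).
def Pre_numpadBFS (b1 : String) (b2 : String) : Prop :=
  b1 ∈ ["7","8","9","4","5","6","1","2","3","0","A"] ∧
  b2 ∈ ["7","8","9","4","5","6","1","2","3","0","A"]
instance (b1 : String) (b2 : String) : Decidable (Pre_numpadBFS b1 b2) := by
  unfold Pre_numpadBFS; infer_instance

def pvWitness_numpadBFS : String × String := ("7", "A")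

def Spec_numpadBFS (b1 : String) (b2 : String) (out : List String) : Prop := out = numpadBFS_alt b1 b2
instance (b1 : String) (b2 : String) (out : List String) : Decidable (Spec_numpadBFS b1 b2 out) := by
  unfold Spec_numpadBFS; infer_instance

-- ===== CLAIM (what is proved, stated in full; the proofs are below) =====
def Claim_equal_numpadBFS : Prop := ∀ (b1 : String) (b2 : String), Dom_numpadBFS b1 b2 → Pre_numpadBFS b1 b2 → Spec_numpadBFS b1 b2 (numpadBFS b1 b2)

-- ===== LEMMAS AND PROOFS =====

-- ===== VERDICT (by name: the statement is the Claim_ definition above) =====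
set_option maxRecDepth 4096 in
theorem numpadBFS_spec : Claim_equal_numpadBFS := by
  intro b1 b2 _ pre
  obtain ⟨h1, h2⟩ := pre
  unfold Spec_numpadBFS
  fin_cases h1 <;> fin_cases h2 <;> decide
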